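-- pv_equiv track=rewrite | github.com/smouni001/HACHETTE | idp470_pipeline/pli_layout_parser.py | _parse_pic_pattern
-- ===== SOURCE A (Python) =====
-- def _parse_pic_pattern(pattern: str) -> tuple[int, int]:
--     """Returns (physical_length, decimal_digits)."""
--     expanded: list[str] = []
--     source = pattern.replace(" ", "")
--     index = 0
--
--     while index < len(source):
--         char = source[index]
--         if char == "(":
--             close = source.find(")", index)
--             if close == -1 or close + 1 >= len(source):
--                 break
--             repeat_count = int(source[index + 1 : close])
--             repeated_token = source[close + 1]
--             expanded.extend([repeated_token] * repeat_count)
--             index = close + 2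
--             continue
--         expanded.append(char)
--         index += 1
--
--     physical_length = 0
--     decimal_digits = 0
--     decimal_part = False
--
--     for token in expanded:
--         upper = token.upper()
--         if upper == "V":
--             decimal_part = True
--             continue
--         if upper in {"9", "Z", "A", "X", "B", ".", ",", "-", "+", "/"}:
--             physical_length += 1
--             if decimal_part and upper in {"9", "Z"}:
--                 decimal_digits += 1
--
--     return physical_length, decimal_digits
-- ===== SOURCE B (Python) =====
-- def _parse_pic_pattern(pattern: str) -> tuple[int, int]:
--     """Returns (physical_length, decimal_digits)."""
--     source = pattern.replace(" ", "")
--     physical_length = 0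
--     decimal_digits = 0
--     decimal_part = False
--     counted = "9ZAXB.,-+/"
--     i = 0
--     n = len(source)
--     while i < n:
--         char = source[i]
--         if char == "(":
--             close = source.find(")", i)
--             if close == -1 or close + 1 >= n:
--                 break
--             copies = max(int(source[i + 1 : close]), 0)
--             token = source[close + 1]
--             i = close + 2
--         else:
--             copies = 1
--             token = char
--             i += 1
--         upper = token.upper()
--         if upper == "V":
--             if copies:
--                 decimal_part = True
--         elif upper in counted:
--             physical_length += copies
--             if decimal_part and upper in "9Z":
--                 decimal_digits += copies
--     return physical_length, decimal_digits
-- ===== Notes on version B (the rewrite author's own statement) =====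
-- stated objective: alternative
-- what changed: B fuses A's two phases into one streaming pass that never materializes the expanded token list: each (n)X group contributes n to the counters arithmetically (O(pattern length) work instead of O(sum of repeat counts); measured only ~1.4x on the generated inputs, so not claimed as faster).
-- outside the precondition, e.g. on _parse_pic_pattern('(x)9'): A raises ValueError, B raises ValueError; on _parse_pic_pattern('(2)(x)9'): A returns (2, 0), B returns (2, 0)
import Mathlib
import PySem

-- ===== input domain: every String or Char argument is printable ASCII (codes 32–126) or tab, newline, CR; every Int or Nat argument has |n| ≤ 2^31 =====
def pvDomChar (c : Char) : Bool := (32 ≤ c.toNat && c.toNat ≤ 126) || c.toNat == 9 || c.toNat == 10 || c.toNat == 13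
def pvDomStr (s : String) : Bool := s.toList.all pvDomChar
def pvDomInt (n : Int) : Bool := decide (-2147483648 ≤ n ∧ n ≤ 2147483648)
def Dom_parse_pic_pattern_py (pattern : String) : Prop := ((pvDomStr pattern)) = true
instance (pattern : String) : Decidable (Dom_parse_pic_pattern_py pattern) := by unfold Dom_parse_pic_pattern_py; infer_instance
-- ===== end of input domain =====

-- B fuses A's expand-then-count two-phase algorithm into one streaming pass that adds
-- each group's repeat count arithmetically instead of materializing the expanded token list.

-- ===== PORT A =====
-- A, phase 1: the while loop building `expanded`.  `source.find(")", index)` from a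
-- position holding '(' is exactly the first ')' of the remaining suffix, ported as
-- takeWhile/dropWhile (≠ ')'); the int() call is PySem.Int.ofChars? (none = ValueError,
-- excluded by Pre_; the port stops there, an arbitrary choice outside Pre_).
def pvExpand (l : List Char) : List Char :=
  match l with
  | [] => []
  | c :: rest =>
    if c = '(' then
      match hm : rest.dropWhile (· ≠ ')') with
      | [] => []                                  -- close == -1: break
      | _ :: [] => []                             -- close + 1 >= len(source): break
      | _ :: t :: rest' =>
        match PySem.Int.ofChars? (rest.takeWhile (· ≠ ')')) with
        | none => []                              -- ValueError in Python (outside Pre_)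
        | some r => List.replicate r.toNat t ++ pvExpand rest'
    else c :: pvExpand rest
termination_by l.length
decreasing_by
  · have h := List.length_dropWhile_le (p := (· ≠ ')')) (l := rest)
    rw [hm] at h; simp at h ⊢; omega
  · simp

def pvCountedSet : List Char := ['9', 'Z', 'A', 'X', 'B', '.', ',', '-', '+', '/']

-- A, phase 2: one step of the `for token in expanded` loop over (physical, decimals, decimal_part).
def pvStep (st : Int × Int × Bool) (t : Char) : Int × Int × Bool :=
  let u := PySem.Chars.upperChar t
  if u = 'V' then (st.1, st.2.1, true)
  else if u ∈ pvCountedSet then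
    (st.1 + 1, st.2.1 + (if st.2.2 ∧ u ∈ ['9', 'Z'] then (1 : Int) else 0), st.2.2)
  else st

def parse_pic_pattern_py (pattern : String) : Int × Int :=
  let source := PySem.Chars.replace pattern.toList [' '] []
  let fin := (pvExpand source).foldl pvStep (0, 0, false)
  (fin.1, fin.2.1)

-- ===== PORT B =====
-- B: apply one token with its multiplicity to the running counters.
def pvApply (t : Char) (copies : Int) (st : Int × Int × Bool) : Int × Int × Bool :=
  let u := PySem.Chars.upperChar t
  if u = 'V' then (st.1, st.2.1, st.2.2 || decide (copies ≠ 0))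
  else if u ∈ "9ZAXB.,-+/".toList then
    (st.1 + copies, st.2.1 + (if st.2.2 ∧ u ∈ "9Z".toList then copies else 0), st.2.2)
  else st

-- B: the single fused while loop.
def pvScan (l : List Char) (p d : Int) (f : Bool) : Int × Int :=
  match l with
  | [] => (p, d)
  | c :: rest =>
    if c = '(' then
      match hm : rest.dropWhile (· ≠ ')') with
      | [] => (p, d)
      | _ :: [] => (p, d)
      | _ :: t :: rest' =>
        let copies : Int := max ((PySem.Int.ofChars? (rest.takeWhile (· ≠ ')'))).getD 0) 0
        let st := pvApply t copies (p, d, f)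
        pvScan rest' st.1 st.2.1 st.2.2
    else
      let st := pvApply c 1 (p, d, f)
      pvScan rest st.1 st.2.1 st.2.2
termination_by l.length
decreasing_by
  · have h := List.length_dropWhile_le (p := (· ≠ ')')) (l := rest)
    rw [hm] at h; simp at h ⊢; omega
  · simp

def parse_pic_pattern_py_alt (pattern : String) : Int × Int :=
  pvScan (PySem.Chars.replace pattern.toList [' '] []) 0 0 false

-- ===== PRECONDITION & SPEC =====
-- Pre_ excludes the patterns on which A raises ValueError: a scanned "(…)" group whose
-- body is not a valid int literal.  It is stated positionally — EVERY '(' of the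
-- space-stripped pattern whose group closes before the end must enclose a valid int —
-- which is slightly narrower than A's scan (a malformed group can sit unscanned inside
-- repeated data, where both programs still return the same value; see the cites).
def pvGroupOk (rest : List Char) : Bool :=
  match rest.dropWhile (· ≠ ')') with
  | [] => true
  | _ :: [] => true
  | _ :: _ :: _ => (PySem.Int.ofChars? (rest.takeWhile (· ≠ ')'))).isSome

def Pre_parse_pic_pattern_py (pattern : String) : Prop :=
  ∀ i (_ : i < (PySem.Chars.replace pattern.toList [' '] []).length),
    (PySem.Chars.replace pattern.toList [' '] [])[i] = '(' →
      pvGroupOk ((PySem.Chars.replace pattern.toList [' '] []).drop (i + 1)) = true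
instance (pattern : String) : Decidable (Pre_parse_pic_pattern_py pattern) := by
  unfold Pre_parse_pic_pattern_py; infer_instance

def pvWitness_parse_pic_pattern_py : String := "PIC 9(3)V9(2)"

def Spec_parse_pic_pattern_py (pattern : String) (out : Int × Int) : Prop := out = parse_pic_pattern_py_alt pattern
instance (pattern : String) (out : Int × Int) : Decidable (Spec_parse_pic_pattern_py pattern out) := by unfold Spec_parse_pic_pattern_py; infer_instance

-- ===== CLAIM (what is proved, stated in full; the proofs are below) =====
def Claim_equal_parse_pic_pattern_py : Prop := ∀ (pattern : String), Dom_parse_pic_pattern_py pattern → Pre_parse_pic_pattern_py pattern → Spec_parse_pic_pattern_py pattern (parse_pic_pattern_py pattern)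

-- ===== LEMMAS AND PROOFS =====

-- proof-side characterisation of Pre_ as a recursion along the scanned list
def pvPreOk (l : List Char) : Bool :=
  match l with
  | [] => true
  | c :: rest => (if c = '(' then pvGroupOk rest else true) && pvPreOk rest

theorem pvPreOk_iff (l : List Char) :
    pvPreOk l = true ↔ ∀ i (_ : i < l.length), l[i] = '(' → pvGroupOk (l.drop (i + 1)) = true := by
  induction l with
  | nil => simp [pvPreOk]
  | cons c rest ih =>
    simp only [pvPreOk, Bool.and_eq_true, ih]
    constructor
    · rintro ⟨h1, h2⟩ i hi hc
      cases i with
      | zero =>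
        simp only [List.getElem_cons_zero] at hc
        subst hc
        simpa using h1
      | succ j => exact h2 j (by simpa using hi) (by simpa using hc)
    · intro h
      refine ⟨?_, fun j hj hc => ?_⟩
      · split_ifs with hc
        · simpa using h 0 (by simp) (by simp [hc])
        · rfl
      · simpa using h (j + 1) (by simpa using hj) (by simpa using hc)

theorem pvPreOk_suffix (x y : List Char) (h : pvPreOk (x ++ y) = true) : pvPreOk y = true := by
  induction x with
  | nil => exact h
  | cons c rest ih =>
    simp only [List.cons_append, pvPreOk, Bool.and_eq_true] at h
    exact ih h.2

-- one non-'(' token: A's loop step equals B's apply with multiplicity 1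
theorem pvStep_eq_apply_one (st : Int × Int × Bool) (c : Char) :
    pvStep st c = pvApply c 1 st := by
  simp only [pvStep, pvApply]
  split_ifs with h1 h2 h2 <;> simp_all [pvCountedSet]

-- a run of k equal tokens under A's fold equals B's single arithmetic application
theorem pvApply_succ (t : Char) (k : Nat) (st : Int × Int × Bool) :
    pvApply t (k : Int) (pvStep st t) = pvApply t ((k + 1 : Nat) : Int) st := by
  have hk : ¬((k : Int) + 1 = 0) := by omega
  have hc : ("9ZAXB.,-+/".toList : List Char) = pvCountedSet := by rfl
  have hz : ("9Z".toList : List Char) = ['9', 'Z'] := by rfl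
  simp only [pvStep, pvApply, hc, hz]
  split_ifs <;> simp_all <;> omega

theorem pvFold_replicate (k : Nat) (t : Char) (st : Int × Int × Bool) :
    (List.replicate k t).foldl pvStep st = pvApply t (k : Int) st := by
  induction k generalizing st with
  | zero => simp [pvApply]
  | succ k ih =>
    rw [List.replicate_succ, List.foldl_cons, ih, pvApply_succ]

theorem pvMain : ∀ (n : Nat) (l : List Char), l.length ≤ n → pvPreOk l = true →
    ∀ (st : Int × Int × Bool),
      (((pvExpand l).foldl pvStep st).1, ((pvExpand l).foldl pvStep st).2.1)
        = pvScan l st.1 st.2.1 st.2.2 := by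
  intro n
  induction n with
  | zero =>
    intro l hl _ st
    have : l = [] := List.length_eq_zero_iff.mp (Nat.le_zero.mp hl)
    subst this; simp [pvExpand, pvScan]
  | succ n ih =>
    intro l hl hpre st
    match l with
    | [] => simp [pvExpand, pvScan]
    | c :: rest =>
      by_cases hc : c = '('
      · subst hc
        simp only [pvPreOk, Bool.and_eq_true] at hpre
        rw [pvExpand, pvScan]
        cases hm : rest.dropWhile (· ≠ ')') with
        | nil => simp
        | cons a tail =>
          cases tail with
          | nil => simp
          | cons t rest' =>
            have hsplit : rest = (rest.takeWhile (· ≠ ')') ++ [a, t]) ++ rest' := by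
              conv_lhs => rw [← List.takeWhile_append_dropWhile (p := (· ≠ ')')) (l := rest)]
              rw [hm]; simp
            have hlen : rest'.length ≤ n := by
              have h := List.length_dropWhile_le (p := (· ≠ ')')) (l := rest)
              rw [hm] at h; simp at h hl; omega
            have hpre' : pvPreOk rest' = true := pvPreOk_suffix _ _ (hsplit ▸ hpre.2)
            have hok : (PySem.Int.ofChars? (rest.takeWhile (· ≠ ')'))).isSome := by
              have := hpre.1; rw [pvGroupOk, hm] at this; exact this
            obtain ⟨r, hr⟩ := Option.isSome_iff_exists.mp hok
            simp only [hr, if_true, Option.getD_some]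
            rw [List.foldl_append, pvFold_replicate]
            have hmax : max r 0 = ((r.toNat : Nat) : Int) := by
              simp
            rw [hmax]
            exact ih rest' hlen hpre' _
      · rw [pvExpand, pvScan]
        simp only [if_neg hc, List.foldl_cons]
        simp only [pvPreOk, if_neg hc, Bool.true_and] at hpre
        have hlen : rest.length ≤ n := by simp at hl; omega
        rw [pvStep_eq_apply_one]
        exact ih rest hlen hpre _

-- ===== VERDICT (by name: the statement is the Claim_ definition above) =====
theorem parse_pic_pattern_py_spec : Claim_equal_parse_pic_pattern_py := by
  intro pattern _ hpre
  unfold Spec_parse_pic_pattern_py parse_pic_pattern_py parse_pic_pattern_py_alt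
  exact pvMain _ _ (Nat.le_refl _) ((pvPreOk_iff _).mpr hpre) (0, 0, false)
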